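-- pv_equiv track=rewrite | github.com/Jordan231111/CodeForce-Solutions | test_median_subsets.py | expected_prefix_counts
-- ===== SOURCE A (Python) =====
-- def expected_prefix_counts(p):
--     # brute on small only
--     def meds(arr):
--         n = len(arr)
--         s = set()
--         for L in range(n):
--             for R in range(L+1, n):
--                 b = sorted(arr[L:R+1])
--                 k = (len(b)+1)//2 - 1
--                 s.add(b[k])
--         return s
--     res = []
--     for i in range(1, len(p)+1):
--         res.append(len(meds(p[:i])))
--     return res
-- ===== SOURCE B (Python) =====
-- def expected_prefix_counts(p):
--     # one pass by right endpoint: grow a sorted window leftwards, keep a running set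
--     medians = set()
--     res = []
--     rev_prefix = []  # earlier elements, most recent first
--     for x in p:
--         window = [x]
--         for v in rev_prefix:
--             j = 0
--             while j < len(window) and window[j] < v:
--                 j += 1
--             window.insert(j, v)
--             medians.add(window[(len(window) + 1) // 2 - 1])
--         rev_prefix = [x] + rev_prefix
--         res.append(len(medians))
--     return res
-- ===== Notes on version B (the rewrite author's own statement) =====
-- stated objective: faster
-- what changed: Instead of re-enumerating and fully re-sorting every subarray of every prefix, B processes each right endpoint once, growing the subarray leftwards while maintaining its sorted order by a single insertion step, and accumulates the distinct medians in one running set whose size is emitted after each element.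
import Mathlib
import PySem

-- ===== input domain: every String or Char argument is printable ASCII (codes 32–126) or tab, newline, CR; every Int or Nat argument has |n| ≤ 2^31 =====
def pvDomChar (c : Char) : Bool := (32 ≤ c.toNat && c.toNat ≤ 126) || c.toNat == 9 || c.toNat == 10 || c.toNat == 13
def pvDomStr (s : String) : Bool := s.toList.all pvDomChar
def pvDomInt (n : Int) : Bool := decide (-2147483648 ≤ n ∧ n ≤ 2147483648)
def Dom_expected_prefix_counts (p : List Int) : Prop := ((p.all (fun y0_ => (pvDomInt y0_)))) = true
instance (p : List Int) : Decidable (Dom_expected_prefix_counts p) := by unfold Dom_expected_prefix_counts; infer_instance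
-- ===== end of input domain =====

-- B replaces A's per-prefix re-enumeration and full re-sort of every subarray by one pass over
-- right endpoints with an incrementally maintained sorted window and a running distinct-median set.

-- shared helper: b[(len(b)+1)//2 - 1], the lower median of a sorted list (the index is always in
-- range because both programs apply it to windows of length ≥ 2, so Python's b[k] never raises)
def pvMedOf (b : List Int) : Int :=
  PySem.List.pyGetD b (PySem.Int.floordiv ((b.length : Int) + 1) 2 - 1) 0

-- ===== PORT A =====
-- meds(arr): set of lower medians of all subarrays arr[L:R+1], 0 ≤ L < R < len(arr)
def pvMeds (arr : List Int) : PySem.Set Int :=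
  (PySem.List.pyRange 0 (arr.length : Int) 1).foldl (fun s L =>
    (PySem.List.pyRange (L + 1) (arr.length : Int) 1).foldl (fun s R =>
      PySem.Set.add s (pvMedOf (PySem.List.sorted (PySem.List.slice arr (some L) (some (R + 1))) (fun x => x) false))) s)
    PySem.Set.empty

def expected_prefix_counts (p : List Int) : List Int :=
  (PySem.List.pyRange 1 ((p.length : Int) + 1) 1).foldl
    (fun res i => res ++ [(((pvMeds (PySem.List.slice p none (some i))).length : Nat) : Int)]) []

-- ===== PORT B =====
-- the inner while loop + insert: put v into the sorted window before the first element ≥ v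
def pvIns (v : Int) : List Int → List Int
  | [] => [v]
  | h :: t => if h < v then h :: pvIns v t else v :: h :: t

-- 'for v in rev_prefix': grow the window leftwards, recording each window's median in the set
def pvInner : List Int → List Int → PySem.Set Int → PySem.Set Int
  | [], _, s => s
  | v :: rest, w, s =>
    let w' := pvIns v w
    pvInner rest w' (PySem.Set.add s (pvMedOf w'))

-- 'for x in p': one step per right endpoint; append the running set's size
def pvOuter : List Int → List Int → PySem.Set Int → List Int → List Int
  | [], _, _, res => res
  | x :: rest, revPref, meds, res =>
    let meds' := pvInner revPref [x] meds
    pvOuter rest (x :: revPref) meds' (res ++ [((meds'.length : Nat) : Int)])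

def expected_prefix_counts_alt (p : List Int) : List Int :=
  pvOuter p [] PySem.Set.empty []

-- ===== PRECONDITION & SPEC =====
def Spec_expected_prefix_counts (p : List Int) (out : List Int) : Prop := out = expected_prefix_counts_alt p
instance (p : List Int) (out : List Int) : Decidable (Spec_expected_prefix_counts p out) := by unfold Spec_expected_prefix_counts; infer_instance

-- ===== CLAIM (what is proved, stated in full; the proofs are below) =====
def Claim_equal_expected_prefix_counts : Prop := ∀ (p : List Int), Dom_expected_prefix_counts p → Spec_expected_prefix_counts p (expected_prefix_counts p)

-- ===== LEMMAS AND PROOFS =====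

-- canonical ascending sort, and the lower median of an arbitrary list
def pvCanon (l : List Int) : List Int := PySem.List.sorted l (fun x => x) false
def pvMedVal (l : List Int) : Int := pvMedOf (pvCanon l)

-- 'y is the median of some subarray p[L..R] with L < R < m'
def pvMM (p : List Int) (m : Nat) (y : Int) : Prop :=
  ∃ L R : Nat, L < R ∧ R < m ∧ y = pvMedVal ((p.drop L).take (R + 1 - L))

lemma pvCanon_perm_eq {l1 l2 : List Int} (h : l1.Perm l2) : pvCanon l1 = pvCanon l2 :=
  PySem.List.sorted_eq_sorted_of_perm l1 l2 (fun x => x) (fun _ _ h => h) h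

lemma pvCanon_perm (l : List Int) : (pvCanon l).Perm l :=
  PySem.List.sorted_perm l (fun x => x) false

lemma pvCanon_pairwise (l : List Int) : (pvCanon l).Pairwise (· ≤ ·) :=
  PySem.List.sorted_pairwise l (fun x => x)

lemma pvSliceNat (arr : List Int) (a b : Nat) :
    PySem.List.slice arr (some (a : Int)) (some ((b : Int) + 1)) = (arr.drop a).take (b + 1 - a) := by
  have h : ((b : Int) + 1) = (((b + 1 : Nat)) : Int) := by push_cast; ring
  rw [h, PySem.List.slice_natCast]

lemma pvIns_perm (v : Int) (w : List Int) : (pvIns v w).Perm (v :: w) := by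
  induction w with
  | nil => simp [pvIns]
  | cons h t ih =>
    simp only [pvIns]
    split
    · exact ((ih.cons h).trans (List.Perm.swap v h t))
    · exact List.Perm.refl _

lemma pvIns_pairwise (v : Int) {w : List Int} (h : w.Pairwise (· ≤ ·)) :
    (pvIns v w).Pairwise (· ≤ ·) := by
  induction w with
  | nil => simp [pvIns]
  | cons a t ih =>
    simp only [pvIns]
    rcases List.pairwise_cons.1 h with ⟨ha, ht⟩
    split
    · rename_i hav
      refine List.pairwise_cons.2 ⟨?_, ih ht⟩
      intro y hy
      rcases List.mem_cons.1 ((pvIns_perm v t).mem_iff.1 hy) with h1 | h2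
      · subst h1; omega
      · exact ha y h2
    · rename_i hav
      refine List.pairwise_cons.2 ⟨?_, h⟩
      intro y hy
      rcases List.mem_cons.1 hy with h1 | h2
      · subst h1; omega
      · exact le_trans (by omega) (ha y h2)

lemma pvIns_canon (v : Int) (u : List Int) : pvIns v (pvCanon u) = pvCanon (u ++ [v]) := by
  have hp : (pvIns v (pvCanon u)).Perm (pvCanon (u ++ [v])) :=
    ((pvIns_perm v (pvCanon u)).trans ((pvCanon_perm u).cons v)).trans
      (((List.perm_append_singleton v u).symm).trans (pvCanon_perm (u ++ [v])).symm)
  exact List.Perm.eq_of_pairwise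
    (fun a b _ _ h1 h2 => le_antisymm h1 h2)
    (pvIns_pairwise v (pvCanon_pairwise u)) (pvCanon_pairwise _) hp

-- membership in the set produced by pvInner: one new median per window length
lemma pvInner_mem : ∀ (r u : List Int) (s : PySem.Set Int) (y : Int),
    y ∈ pvInner r (pvCanon u) s ↔
      y ∈ s ∨ ∃ j : Nat, j < r.length ∧ y = pvMedVal (u ++ r.take (j + 1)) := by
  intro r
  induction r with
  | nil => intro u s y; simp [pvInner]
  | cons v rest ih =>
    intro u s y
    simp only [pvInner, pvIns_canon]
    rw [ih (u ++ [v]) (PySem.Set.add s (pvMedOf (pvCanon (u ++ [v]))))]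
    rw [PySem.Set.mem_add]
    simp only [pvMedVal]
    constructor
    · rintro ((hs | hnew) | ⟨j, hj, hy⟩)
      · exact Or.inl hs
      · exact Or.inr ⟨0, by simp, by simpa [pvMedVal] using hnew⟩
      · exact Or.inr ⟨j + 1, by simpa using hj, by simpa [List.append_assoc] using hy⟩
    · rintro (hs | ⟨j, hj, hy⟩)
      · exact Or.inl (Or.inl hs)
      · cases j with
        | zero => exact Or.inl (Or.inr (by simpa [pvMedVal] using hy))
        | succ j' =>
          exact Or.inr ⟨j', by simpa using hj, by simpa [List.append_assoc] using hy⟩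

lemma pvInner_nodup : ∀ (r w : List Int) (s : PySem.Set Int),
    s.Nodup → (pvInner r w s).Nodup := by
  intro r
  induction r with
  | nil => intro w s hs; simpa [pvInner] using hs
  | cons v rest ih =>
    intro w s hs
    simp only [pvInner]
    exact ih _ _ (PySem.Set.nodup_add _ _ hs)

-- generic membership through a fold whose step satisfies a pointwise characterisation
lemma pvMemFoldl {β : Type} (h : List Int → β → List Int) (Q : β → Int → Prop)
    (hh : ∀ s a y, y ∈ h s a ↔ y ∈ s ∨ Q a y) :
    ∀ (l : List β) (s : List Int) (y : Int),
      y ∈ l.foldl h s ↔ y ∈ s ∨ ∃ a ∈ l, Q a y := by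
  intro l
  induction l with
  | nil => intro s y; simp
  | cons a t ih =>
    intro s y
    simp only [List.foldl_cons]
    rw [ih, hh]
    constructor
    · rintro ((hs | hq) | ⟨b, hb, hqb⟩)
      · exact Or.inl hs
      · exact Or.inr ⟨a, List.mem_cons_self, hq⟩
      · exact Or.inr ⟨b, List.mem_cons_of_mem _ hb, hqb⟩
    · rintro (hs | ⟨b, hb, hqb⟩)
      · exact Or.inl (Or.inl hs)
      · rcases List.mem_cons.1 hb with rfl | hb'
        · exact Or.inl (Or.inr hqb)
        · exact Or.inr ⟨b, hb', hqb⟩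

-- generic nodup preservation through a fold
lemma pvNodupFoldl {β : Type} (h : List Int → β → List Int)
    (hh : ∀ s a, s.Nodup → (h s a).Nodup) :
    ∀ (l : List β) (s : List Int), s.Nodup → (l.foldl h s).Nodup := by
  intro l
  induction l with
  | nil => intro s hs; simpa using hs
  | cons a t ih => intro s hs; exact ih _ (hh s a hs)

lemma pvMeds_nodup (arr : List Int) : (pvMeds arr).Nodup := by
  unfold pvMeds
  refine pvNodupFoldl _ (fun s L hs => ?_) _ _ List.nodup_nil
  exact pvNodupFoldl _ (fun s R hs => PySem.Set.nodup_add _ _ hs) _ _ hs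

-- membership in A's per-prefix set is exactly pvMM
lemma pvMeds_mem (arr : List Int) (y : Int) : y ∈ pvMeds arr ↔ pvMM arr arr.length y := by
  unfold pvMeds
  rw [pvMemFoldl _
    (fun L y => ∃ R ∈ PySem.List.pyRange (L + 1) (arr.length : Int) 1,
      y = pvMedOf (PySem.List.sorted (PySem.List.slice arr (some L) (some (R + 1))) (fun x => x) false))
    (fun s L y => PySem.Set.mem_foldl_add _ _ _ _)]
  simp only [PySem.Set.empty, List.not_mem_nil, false_or, PySem.List.mem_pyRange_one]
  constructor
  · rintro ⟨L, ⟨hL0, hLlen⟩, R, ⟨hLR, hRlen⟩, hy⟩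
    refine ⟨L.toNat, R.toNat, by omega, by omega, ?_⟩
    have hL : L = (L.toNat : Int) := by omega
    have hR : R = (R.toNat : Int) := by omega
    rw [hL, hR] at hy
    rw [hy, pvSliceNat]
    rfl
  · rintro ⟨L, R, hLR, hRlen, hy⟩
    refine ⟨(L : Int), ⟨by omega, by omega⟩, (R : Int), ⟨by omega, by omega⟩, ?_⟩
    rw [pvSliceNat, hy]
    rfl

-- pvMM only looks at the first m elements
lemma pvMM_take (p : List Int) (i m : Nat) (h : m ≤ i) (y : Int) :
    pvMM (p.take i) m y ↔ pvMM p m y := by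
  have key : ∀ L R : Nat, R < m →
      ((p.take i).drop L).take (R + 1 - L) = (p.drop L).take (R + 1 - L) := by
    intro L R hR
    rw [List.drop_take, List.take_take]
    congr 1
    omega
  constructor
  · rintro ⟨L, R, h1, h2, h3⟩; exact ⟨L, R, h1, h2, by rw [← key L R h2]; exact h3⟩
  · rintro ⟨L, R, h1, h2, h3⟩; exact ⟨L, R, h1, h2, by rw [key L R h2]; exact h3⟩

-- one more right endpoint: the new medians are those of subarrays ending at position m
lemma pvMM_succ (p : List Int) (m : Nat) (y : Int) :
    pvMM p (m + 1) y ↔ pvMM p m y ∨ ∃ L : Nat, L < m ∧ y = pvMedVal ((p.drop L).take (m + 1 - L)) := by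
  constructor
  · rintro ⟨L, R, h1, h2, h3⟩
    by_cases hR : R < m
    · exact Or.inl ⟨L, R, h1, hR, h3⟩
    · have : R = m := by omega
      subst this
      exact Or.inr ⟨L, h1, h3⟩
  · rintro (⟨L, R, h1, h2, h3⟩ | ⟨L, h1, h2⟩)
    · exact ⟨L, R, h1, by omega, h3⟩
    · exact ⟨L, m, h1, by omega, h2⟩

-- the subarray p[L..m] when p = pref ++ x :: rest, L < m = pref.length
lemma pvSub_eq (pref : List Int) (x : Int) (rest : List Int) (L : Nat) (hL : L < pref.length) :
    (((pref ++ x :: rest).drop L).take (pref.length + 1 - L)) = pref.drop L ++ [x] := by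
  rw [List.drop_append_of_le_length (by omega), List.take_append]
  rw [List.take_of_length_le (by rw [List.length_drop]; omega)]
  congr 1
  rw [List.length_drop]
  have h1 : pref.length + 1 - L - (pref.length - L) = 1 := by omega
  rw [h1]
  simp

-- the new medians produced at step m (window u = [x], r = pref.reverse) are those of pvMM's new row
lemma pvNewMed (pref : List Int) (x : Int) (rest : List Int) (j : Nat) (hj : j < pref.length) :
    pvMedVal ([x] ++ pref.reverse.take (j + 1)) =
      pvMedVal (((pref ++ x :: rest).drop (pref.length - 1 - j)).take (pref.length + 1 - (pref.length - 1 - j))) := by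
  rw [pvSub_eq pref x rest _ (by omega)]
  unfold pvMedVal
  congr 1
  apply pvCanon_perm_eq
  have h := List.reverse_take (l := pref.reverse) (i := j + 1)
  rw [List.reverse_reverse, List.length_reverse] at h
  have hrev : pref.reverse.take (j + 1) = (pref.drop (pref.length - (j + 1))).reverse := by
    rw [← h, List.reverse_reverse]
  rw [hrev]
  have h1 : pref.length - (j + 1) = pref.length - 1 - j := by omega
  rw [h1]
  exact (List.Perm.append_left [x] (List.reverse_perm _)).trans List.perm_append_comm

-- two nodup lists with the same members have the same length
lemma pvLenEq {s t : List Int} (hs : s.Nodup) (ht : t.Nodup) (h : ∀ y, y ∈ s ↔ y ∈ t) :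
    s.length = t.length :=
  ((List.perm_ext_iff_of_nodup hs ht).2 h).length_eq

-- A's result as a map over prefix lengths
lemma pvFoldlApp {β : Type} (f : β → Int) :
    ∀ (l : List β) (res : List Int), l.foldl (fun r a => r ++ [f a]) res = res ++ l.map f := by
  intro l
  induction l with
  | nil => intro res; simp
  | cons a t ih => intro res; simp [ih]

lemma pvA_map (p : List Int) :
    expected_prefix_counts p =
      (List.range p.length).map (fun k => (((pvMeds (p.take (k + 1))).length : Nat) : Int)) := by
  unfold expected_prefix_counts
  rw [pvFoldlApp]
  rw [PySem.List.pyRange_one]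
  have hlen : ((p.length : Int) + 1 - 1).toNat = p.length := by omega
  rw [hlen, List.map_map, List.nil_append]
  apply List.map_congr_left
  intro k hk
  simp only [Function.comp_apply]
  have hsl : PySem.List.slice p none (some ((1 : Int) + (k : Int))) = p.take (k + 1) := by
    rw [PySem.List.slice_to p (by omega)]
    congr 1
    omega
  rw [hsl]

-- B's loop invariant: pvOuter emits exactly A's per-prefix counts
lemma pvB_inv : ∀ (rest pref : List Int) (meds : PySem.Set Int) (res : List Int),
    meds.Nodup → (∀ y, y ∈ meds ↔ pvMM (pref ++ rest) pref.length y) →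
    pvOuter rest pref.reverse meds res =
      res ++ (List.range rest.length).map
        (fun k => (((pvMeds ((pref ++ rest).take (pref.length + k + 1))).length : Nat) : Int)) := by
  intro rest
  induction rest with
  | nil => intro pref meds res _ _; simp [pvOuter]
  | cons x rest ih =>
    intro pref meds res hnd hmem
    simp only [pvOuter]
    have hx : ([x] : List Int) = pvCanon [x] := by
      unfold pvCanon
      exact (PySem.List.sorted_eq_self_of_pairwise _ _ (by simp)).symm
    -- membership of the updated set
    have hmem' : ∀ y, y ∈ pvInner pref.reverse [x] meds ↔
        pvMM (pref ++ x :: rest) (pref.length + 1) y := by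
      intro y
      rw [hx, pvInner_mem pref.reverse [x] meds y]
      rw [pvMM_succ]
      have hmm : pvMM (pref ++ x :: rest) pref.length y ↔ y ∈ meds := (hmem y).symm
      rw [hmm]
      constructor
      · rintro (hs | ⟨j, hj, hy⟩)
        · exact Or.inl hs
        · rw [List.length_reverse] at hj
          refine Or.inr ⟨pref.length - 1 - j, by omega, ?_⟩
          rw [← pvNewMed pref x rest j hj]
          exact hy
      · rintro (hs | ⟨L, hL, hy⟩)
        · exact Or.inl hs
        · refine Or.inr ⟨pref.length - 1 - L, by rw [List.length_reverse]; omega, ?_⟩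
          rw [pvNewMed pref x rest (pref.length - 1 - L) (by omega)]
          have : pref.length - 1 - (pref.length - 1 - L) = L := by omega
          rw [this]
          exact hy
    have hnd' : (pvInner pref.reverse [x] meds).Nodup := pvInner_nodup _ _ _ hnd
    -- the emitted count equals A's count for the prefix of length pref.length + 1
    have hcount : (pvInner pref.reverse [x] meds).length =
        (pvMeds ((pref ++ x :: rest).take (pref.length + 1))).length := by
      apply pvLenEq hnd' (pvMeds_nodup _)
      intro y
      rw [hmem', pvMeds_mem]
      have htl : ((pref ++ x :: rest).take (pref.length + 1)).length = pref.length + 1 := by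
        rw [List.length_take]
        simp
      rw [htl, pvMM_take _ _ _ (le_refl _)]
    -- apply the induction hypothesis with pref' = pref ++ [x]
    have hrev : x :: pref.reverse = (pref ++ [x]).reverse := by simp
    have hassoc : (pref ++ [x]) ++ rest = pref ++ x :: rest := by simp
    have := ih (pref ++ [x]) (pvInner pref.reverse [x] meds)
      (res ++ [(((pvInner pref.reverse [x] meds).length : Nat) : Int)])
      hnd' (by
        intro y
        rw [hassoc, List.length_append, List.length_singleton]
        exact hmem' y)
    rw [hrev, this, hassoc]
    simp only [List.length_append, List.length_cons, List.length_nil]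
    rw [List.range_succ_eq_map, List.map_cons, List.map_map]
    rw [List.append_assoc, List.singleton_append]
    congr 1
    congr 1
    · rw [hcount]
    · apply List.map_congr_left
      intro k hk
      simp only [Function.comp_apply]
      have hz : pref.length + 1 + k + 1 = pref.length + Nat.succ k + 1 := by omega
      rw [hz]

-- ===== VERDICT (by name: the statement is the Claim_ definition above) =====
theorem expected_prefix_counts_spec : Claim_equal_expected_prefix_counts := by
  intro p _
  unfold Spec_expected_prefix_counts expected_prefix_counts_alt
  have hb := pvB_inv p [] PySem.Set.empty [] List.nodup_nil (by
    intro y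
    simp only [PySem.Set.empty, List.not_mem_nil, List.length_nil, false_iff]
    rintro ⟨L, R, h1, h2, _⟩
    omega)
  simp only [List.reverse_nil, List.length_nil, List.nil_append] at hb
  rw [hb, pvA_map]
  apply List.map_congr_left
  intro k hk
  have hz : 0 + k + 1 = k + 1 := by omega
  rw [hz]
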